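-- pv_equiv track=rewrite | github.com/hariparam/Python-code | hw3/homework3.py | is_unique_solved
-- ===== SOURCE A (Python) =====
-- def is_unique_solved(array, n):
--     for i in range(len(array)):
--         if i < n:
--             if (array[len(array) - 1 - i] != i + 1):
--                 return False
--         else:
--             if (array[len(array) - 1 - i] != 0):
--                 return False
--     return True
-- ===== SOURCE B (Python) =====
-- def is_unique_solved(array, n):
--     L = len(array)
--     m = min(max(n, 0), L)  # clamp: n<0 behaves as 0, n>L as L
--     i = 0
--     while i < L and array[i] == 0:
--         i += 1
--     if L - i != m:
--         return False
--     return all(v == m - j for j, v in enumerate(array[i:]))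
-- ===== Notes on version B (the rewrite author's own statement) =====
-- stated objective: alternative
-- what changed: Instead of A's single backward scan branching per position, B scans from the FRONT: it counts the leading zeros with a while loop, demands that count equal len-m (m = n clamped to [0,len]), and then verifies the remainder is the arithmetic run m, m-1, ..., 1 via enumerate.
import Mathlib
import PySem

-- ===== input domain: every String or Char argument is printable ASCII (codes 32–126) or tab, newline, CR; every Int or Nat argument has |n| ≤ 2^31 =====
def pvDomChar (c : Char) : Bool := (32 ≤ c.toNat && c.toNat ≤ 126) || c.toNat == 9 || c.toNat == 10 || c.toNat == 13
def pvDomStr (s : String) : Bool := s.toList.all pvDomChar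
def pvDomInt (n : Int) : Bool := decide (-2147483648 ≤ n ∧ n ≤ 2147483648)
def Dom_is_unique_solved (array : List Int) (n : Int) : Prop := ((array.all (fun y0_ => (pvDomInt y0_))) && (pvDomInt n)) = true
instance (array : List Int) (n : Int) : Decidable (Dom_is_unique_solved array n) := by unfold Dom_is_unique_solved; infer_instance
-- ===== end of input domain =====

-- B scans from the front: count the leading zeros, require that count to be len-m
-- (m = n clamped to [0,len]), then verify the rest is the run m,m-1,...,1 — instead of
-- A's backward index-by-index scan with a per-position branch; objective: alternative.

-- ===== PORT A =====
-- the 'for i in range(len(array))' loop with early 'return False', as structural recursion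
-- over the index list; array[len(array)-1-i] is PySem.List.pyGet? (always in range here)
def isuGo (array : List Int) (n : Int) : List Int → Bool
  | [] => true
  | i :: rest =>
    if i < n then
      if PySem.List.pyGet? array ((array.length : Int) - 1 - i) ≠ some (i + 1) then false
      else isuGo array n rest
    else
      if PySem.List.pyGet? array ((array.length : Int) - 1 - i) ≠ some 0 then false
      else isuGo array n rest

def is_unique_solved (array : List Int) (n : Int) : Bool :=
  isuGo array n (PySem.List.pyRange 0 (array.length : Int) 1)

-- ===== PORT B =====
-- the 'while i < L and array[i] == 0: i += 1' loop: count of leading zeros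
def isuAltLead : List Int → Nat
  | [] => 0
  | x :: xs => if x = 0 then isuAltLead xs + 1 else 0

def is_unique_solved_alt (array : List Int) (n : Int) : Bool :=
  let L : Int := array.length
  let m : Int := min (max n 0) L
  let i : Nat := isuAltLead array
  if L - (i : Int) ≠ m then false
  else (PySem.List.enumerate (array.drop i)).all (fun p => p.2 == m - p.1)

-- ===== PRECONDITION & SPEC =====
def Spec_is_unique_solved (array : List Int) (n : Int) (out : Bool) : Prop := out = is_unique_solved_alt array n
instance (array : List Int) (n : Int) (out : Bool) : Decidable (Spec_is_unique_solved array n out) := by unfold Spec_is_unique_solved; infer_instance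

-- ===== CLAIM (what is proved, stated in full; the proofs are below) =====
def Claim_equal_is_unique_solved : Prop := ∀ (array : List Int) (n : Int), Dom_is_unique_solved array n → Spec_is_unique_solved array n (is_unique_solved array n)

-- ===== LEMMAS AND PROOFS =====

-- per-index check of A's loop body
def isuCheck (array : List Int) (n : Int) (i : Int) : Bool :=
  if i < n then PySem.List.pyGet? array ((array.length : Int) - 1 - i) == some (i + 1)
  else PySem.List.pyGet? array ((array.length : Int) - 1 - i) == some 0

theorem isuGo_eq_all (array : List Int) (n : Int) (l : List Int) :
    isuGo array n l = l.all (isuCheck array n) := by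
  induction l with
  | nil => rfl
  | cons i rest ih =>
    simp only [isuGo, isuCheck, List.all_cons]
    split_ifs with h1 h2 h2 <;> simp_all

theorem pyGet?_toNat (xs : List Int) (t : Int) (h0 : 0 ≤ t) :
    PySem.List.pyGet? xs t = xs[t.toNat]? := by
  obtain ⟨k, rfl⟩ := Int.eq_ofNat_of_zero_le h0
  simp [PySem.List.pyGet?_natCast]

-- the common pointwise characterisation of both programs
theorem is_unique_solved_iff (array : List Int) (n : Int) :
    is_unique_solved array n = true ↔
      ∀ j : Nat, (hj : j < array.length) →
        array[j] = (if (array.length : Int) - 1 - j < n then (array.length : Int) - j else 0) := by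
  rw [is_unique_solved, isuGo_eq_all, List.all_eq_true]
  constructor
  · intro H j hj
    have hm : ((array.length : Int) - 1 - (j : Int)) ∈ PySem.List.pyRange 0 (array.length : Int) 1 :=
      PySem.List.mem_pyRange_one.mpr ⟨by omega, by omega⟩
    have hc := H _ hm
    unfold isuCheck at hc
    rw [pyGet?_toNat _ _ (by omega)] at hc
    have hidx : ((array.length : Int) - 1 - ((array.length : Int) - 1 - (j : Int))).toNat = j := by omega
    rw [hidx, List.getElem?_eq_getElem hj] at hc
    by_cases h : (array.length : Int) - 1 - (j : Int) < n
    · rw [if_pos h] at hc ⊢; simp at hc; omega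
    · rw [if_neg h] at hc ⊢; simpa using hc
  · intro H i hi
    rw [PySem.List.mem_pyRange_one] at hi
    unfold isuCheck
    rw [pyGet?_toNat _ _ (by omega)]
    have hj : ((array.length : Int) - 1 - i).toNat < array.length := by omega
    rw [List.getElem?_eq_getElem hj]
    have hc := H _ hj
    have hij : (array.length : Int) - 1 - (((array.length : Int) - 1 - i).toNat : Int) = i := by omega
    rw [hij] at hc
    have hval : (array.length : Int) - (((array.length : Int) - 1 - i).toNat : Int) = i + 1 := by omega
    rw [hval] at hc
    by_cases h : i < n
    · rw [if_pos h] at hc ⊢; simp [hc]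
    · rw [if_neg h] at hc ⊢; simp [hc]

-- leading-zero count: basic facts
theorem isuAltLead_le (xs : List Int) : isuAltLead xs ≤ xs.length := by
  induction xs with
  | nil => simp [isuAltLead]
  | cons x t ih => simp only [isuAltLead, List.length_cons]; split_ifs <;> omega

theorem isuAltLead_zero (xs : List Int) (k : Nat) (hk : k < isuAltLead xs)
    (hl : k < xs.length) : xs[k] = 0 := by
  induction xs generalizing k with
  | nil => simp at hl
  | cons x t ih =>
    simp only [isuAltLead] at hk
    split_ifs at hk with hx
    · cases k with
      | zero => simpa using hx
      | succ k' => exact ih k' (by omega) (by simpa using hl)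
    · omega

theorem isuAltLead_ne (xs : List Int) (hl : isuAltLead xs < xs.length) :
    xs[isuAltLead xs] ≠ 0 := by
  induction xs with
  | nil => simp at hl
  | cons x t ih =>
    by_cases hx : x = 0
    · have : isuAltLead (x :: t) = isuAltLead t + 1 := by simp [isuAltLead, hx]
      simp only [this] at hl ⊢
      simpa using ih (by simpa using hl)
    · have : isuAltLead (x :: t) = 0 := by simp [isuAltLead, hx]
      simp only [this]; simpa using hx

theorem isuAltLead_eq (xs : List Int) (c : Nat)
    (hz : ∀ k : Nat, (hk : k < xs.length) → k < c → xs[k] = 0)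
    (hc : c ≤ xs.length)
    (hne : (h : c < xs.length) → xs[c] ≠ 0) : isuAltLead xs = c := by
  by_contra h
  rcases Nat.lt_or_ge (isuAltLead xs) c with hlt | hge
  · have hl : isuAltLead xs < xs.length := by omega
    exact isuAltLead_ne xs hl (hz _ hl hlt)
  · have hlt : c < isuAltLead xs := by omega
    have hl : c < xs.length := by
      have := isuAltLead_le xs; omega
    exact hne hl (isuAltLead_zero xs c hlt hl)

-- the same pointwise characterisation for B
theorem alt_iff (array : List Int) (n : Int) :
    is_unique_solved_alt array n = true ↔
      ∀ j : Nat, (hj : j < array.length) →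
        array[j] = (if (array.length : Int) - 1 - j < n then (array.length : Int) - j else 0) := by
  simp only [is_unique_solved_alt]
  set L : Int := (array.length : Int) with hL
  set m : Int := min (max n 0) L with hm
  have hm0 : 0 ≤ m := by omega
  have hmL : m ≤ L := by omega
  -- the branch condition of A in terms of m
  have hcond : ∀ j : Nat, j < array.length → ((L - 1 - j < n) ↔ ((L - m : Int) ≤ j)) := by
    intro j hj; omega
  constructor
  · intro H j hj
    rw [if_congr (iff_of_eq (propext (hcond j hj))) rfl rfl]
    have hLm : ¬ ((L : Int) - (isuAltLead array : Int) ≠ m) := by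
      intro hc; rw [if_pos hc] at H; exact absurd H (by simp)
    rw [if_neg hLm, List.all_eq_true] at H
    · have hlead : (isuAltLead array : Int) = L - m := by omega
      by_cases hjm : (L - m : Int) ≤ j
      · rw [if_pos hjm]
        have ht : j - isuAltLead array < (array.drop (isuAltLead array)).length := by
          simp [List.length_drop]; omega
        have hmem : (((j - isuAltLead array : Nat) : Int), (array.drop (isuAltLead array))[j - isuAltLead array]) ∈
            PySem.List.enumerate (array.drop (isuAltLead array)) 0 := by
          rw [PySem.List.mem_enumerate_iff]
          exact ⟨j - isuAltLead array, ht, by simp⟩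
        have hc := H _ hmem
        simp only [beq_iff_eq] at hc
        rw [List.getElem_drop] at hc
        have hidx : isuAltLead array + (j - isuAltLead array) = j := by omega
        simp only [hidx] at hc
        rw [hc]; omega
      · rw [if_neg hjm]
        exact isuAltLead_zero array j (by omega) hj
  · intro H
    have hlead : isuAltLead array = (L - m).toNat := by
      apply isuAltLead_eq
      · intro k hk hkc
        have := H k hk
        rw [if_neg (by rw [hcond k hk]; omega)] at this
        exact this
      · omega
      · intro h
        have := H _ h
        rw [if_pos (by rw [hcond _ h]; omega)] at this
        rw [this]; omega
    rw [if_neg (by rw [hlead]; omega)]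
    rw [List.all_eq_true]
    intro p hp
    rw [PySem.List.mem_enumerate_iff] at hp
    obtain ⟨k, hk, rfl⟩ := hp
    have hk' : isuAltLead array + k < array.length := by
      simp [List.length_drop] at hk; omega
    simp only [beq_iff_eq, List.getElem_drop]
    have := H _ hk'
    rw [if_pos (by rw [hcond _ hk']; rw [hlead]; push_cast; omega)] at this
    rw [this, hlead]
    push_cast; omega

-- ===== VERDICT (by name: the statement is the Claim_ definition above) =====
theorem is_unique_solved_spec : Claim_equal_is_unique_solved := by
  intro array n _
  unfold Spec_is_unique_solved
  rw [Bool.eq_iff_iff, is_unique_solved_iff, alt_iff]
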